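-- pv_equiv track=rewrite | github.com/homechan77/Algorithm | Programmers/algorithms_Greedy_조이스틱.py | solution
-- ===== SOURCE A (Python) =====
-- def solution(name):
--     change = [min(ord(i)-ord('A'), ord('Z')-ord(i)+1) for i in name]
--     idx = 0
--     answer = 0
--
--     while True:
--         answer += change[idx]
--         change[idx] =  0
--         if sum(change) == 0:
--             return answer
--
--         left, right = 1, 1
--         while change[idx - left] == 0:
--             left += 1
--         while change[idx + right] == 0:
--             right += 1
--
--         answer += left if left < right else right
--         idx += left if left < right else right
-- ===== SOURCE B (Python) =====
-- def solution(name):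
--     c = [min(ord(ch) - ord('A'), ord('Z') - ord(ch) + 1) for ch in name]
--     n = len(c)
--     nz = [j for j in range(n) if c[j] != 0]   # positions of nonzero cost, ascending
--     rem = sum(c[j] for j in nz)               # sum of costs still standing
--     ans, idx = 0, 0
--     while True:
--         ans += c[idx]
--         if nz and nz[0] == idx:
--             nz.pop(0)
--             rem -= c[idx]
--         if rem == 0:
--             return ans
--         l = idx + n - nz[-1]                  # scan-left distance (wraps to rightmost pending)
--         r = nz[0] - idx                       # scan-right distance (nearest pending on the right)
--         step = l if l < r else r
--         ans += step
--         idx += step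
-- ===== Notes on version B (the rewrite author's own statement) =====
-- stated objective: faster
-- what changed: B precomputes the list of nonzero-cost positions and a running remaining sum once, then replaces A's per-iteration full-array sum and the two linear neighbour scans with O(1) arithmetic on the head/last pending position, exploiting that the cursor is monotone so all pending letters lie to its right.
import Mathlib
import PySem

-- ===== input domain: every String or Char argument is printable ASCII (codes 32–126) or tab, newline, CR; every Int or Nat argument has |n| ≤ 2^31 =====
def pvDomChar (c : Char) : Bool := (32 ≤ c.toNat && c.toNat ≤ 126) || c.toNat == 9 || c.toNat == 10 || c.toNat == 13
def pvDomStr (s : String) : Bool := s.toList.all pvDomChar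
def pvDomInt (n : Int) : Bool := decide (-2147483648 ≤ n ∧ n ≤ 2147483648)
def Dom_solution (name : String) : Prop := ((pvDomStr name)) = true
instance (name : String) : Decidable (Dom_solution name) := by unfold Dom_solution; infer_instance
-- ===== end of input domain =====

-- B replaces A's per-iteration full-array sum and linear left/right scans by a precomputed
-- list of nonzero-cost positions with a running remaining sum (O(n) vs O(n^2)).

-- ===== PORT A =====
-- change = [min(ord(i)-ord('A'), ord('Z')-ord(i)+1) for i in name]  (shared first line of both sources)
def pvChg (name : String) : List Int :=
  name.toList.map (fun ch => min ((ch.toNat : Int) - 65) (90 - (ch.toNat : Int) + 1))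

-- while change[idx - left] == 0: left += 1
def pvScanL (cl : List Int) (idx left : Int) (fuel : Nat) : Int :=
  match fuel with
  | 0 => left
  | f+1 =>
    match PySem.List.pyGet? cl (idx - left) with
    | some v => if v == 0 then pvScanL cl idx (left + 1) f else left
    | none => left      -- IndexError (unreachable under Pre_)

-- while change[idx + right] == 0: right += 1
def pvScanR (cl : List Int) (idx right : Int) (fuel : Nat) : Int :=
  match fuel with
  | 0 => right
  | f+1 =>
    match PySem.List.pyGet? cl (idx + right) with
    | some v => if v == 0 then pvScanR cl idx (right + 1) f else right
    | none => right     -- IndexError (unreachable under Pre_)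

-- the 'while True' loop of A (fuel; the loop runs at most len(name) times under Pre_)
def pvALoop (cl : List Int) (idx ans : Int) (fuel : Nat) : Int :=
  match fuel with
  | 0 => ans
  | f+1 =>
    match PySem.List.pyGet? cl idx with
    | none => ans       -- IndexError (unreachable under Pre_)
    | some v =>
      let ans1 := ans + v
      let cl1 := PySem.List.pySetD cl idx 0
      if cl1.sum == 0 then ans1
      else
        let l := pvScanL cl1 idx 1 (cl1.length + 1)
        let r := pvScanR cl1 idx 1 (cl1.length + 1)
        let step := if l < r then l else r
        pvALoop cl1 (idx + step) (ans1 + step) f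

def solution (name : String) : Int :=
  let change := pvChg name
  pvALoop change 0 0 (change.length + 1)

-- ===== PORT B =====
-- the 'while True' loop of B: nz = pending nonzero positions (ascending), rem = their total cost
def pvBLoop (c : List Int) (n : Int) (nz : List Int) (rem ans idx : Int) (fuel : Nat) : Int :=
  match fuel with
  | 0 => ans
  | f+1 =>
    match PySem.List.pyGet? c idx with
    | none => ans       -- IndexError (unreachable under Pre_)
    | some v =>
      let ans1 := ans + v
      -- if nz and nz[0] == idx: nz.pop(0); rem -= c[idx]
      let nz1 := match nz with
        | j :: rest => if j == idx then rest else j :: rest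
        | [] => []
      let rem1 := match nz with
        | j :: _ => if j == idx then rem - v else rem
        | [] => rem
      if rem1 == 0 then ans1
      else
        match PySem.List.pyGet? nz1 (-1), PySem.List.pyGet? nz1 0 with
        | some last, some first =>
          let l := idx + n - last
          let r := first - idx
          let step := if l < r then l else r
          pvBLoop c n nz1 rem1 (ans1 + step) (idx + step) f
        | _, _ => ans1  -- IndexError on empty nz (unreachable: rem ≠ 0)

def solution_alt (name : String) : Int :=
  let c := pvChg name
  let n : Int := c.length
  let nz := (PySem.List.pyRange 0 n 1).filter (fun j => PySem.List.pyGetD c j 0 != 0)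
  let rem := (nz.map (fun j => PySem.List.pyGetD c j 0)).sum
  pvBLoop c n nz rem 0 0 (c.length + 1)

-- ===== PRECONDITION & SPEC =====
-- Pre_ excludes only the empty string, on which A raises IndexError (change[0]).
def Pre_solution (name : String) : Prop := name ≠ ""
instance (name : String) : Decidable (Pre_solution name) := by unfold Pre_solution; infer_instance
def pvWitness_solution : String := "BZ"

def Spec_solution (name : String) (out : Int) : Prop := out = solution_alt name
instance (name : String) (out : Int) : Decidable (Spec_solution name out) := by unfold Spec_solution; infer_instance

-- ===== CLAIM (what is proved, stated in full; the proofs are below) =====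
def Claim_equal_solution : Prop := ∀ (name : String), Dom_solution name → Pre_solution name → Spec_solution name (solution name)

-- ===== LEMMAS AND PROOFS =====

def pvZpre (c : List Int) (i : Nat) : List Int := List.replicate i 0 ++ c.drop i

def pvNz (c : List Int) (i : Nat) : List Nat :=
  if h : i < c.length then
    (if c.getD i 0 ≠ 0 then i :: pvNz c (i+1) else pvNz c (i+1))
  else []
termination_by c.length - i

theorem pvDropCons (c : List Int) (i : Nat) (h : i < c.length) :
    c.drop i = c.getD i 0 :: c.drop (i+1) := by
  rw [List.drop_eq_getElem_cons h]
  simp [List.getD, List.getElem?_eq_getElem h]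

theorem pvRepCons (a : Nat) (t : List Int) :
    List.replicate a (0:Int) ++ 0 :: t = List.replicate (a+1) (0:Int) ++ t := by
  rw [List.replicate_succ', List.append_assoc]; rfl

theorem pvNz_mem (c : List Int) (i : Nat) :
    ∀ x ∈ pvNz c i, i ≤ x ∧ x < c.length ∧ c.getD x 0 ≠ 0 := by
  fun_induction pvNz c i with
  | case1 i h hnz ih =>
    intro x hx
    rcases List.mem_cons.1 hx with rfl | hx
    · exact ⟨le_refl _, h, hnz⟩
    · obtain ⟨h1, h2, h3⟩ := ih x hx; exact ⟨by omega, h2, h3⟩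
  | case2 i h hz ih =>
    intro x hx
    obtain ⟨h1, h2, h3⟩ := ih x hx; exact ⟨by omega, h2, h3⟩
  | case3 i h => intro x hx; simp at hx

theorem pvNz_empty_iff (c : List Int) (i : Nat) :
    pvNz c i = [] ↔ ∀ m, i ≤ m → m < c.length → c.getD m 0 = 0 := by
  fun_induction pvNz c i with
  | case1 i h hnz ih => simp; exact ⟨i, le_refl _, h, by simpa using hnz⟩
  | case2 i h hz ih =>
    rw [ih]
    constructor
    · intro hall m h1 h2
      rcases Nat.eq_or_lt_of_le h1 with rfl | h1
      · simpa using hz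
      · exact hall m h1 h2
    · intro hall m h1 h2; exact hall m (by omega) h2
  | case3 i h => simp; intro m h1 h2; omega

theorem pvDropSum_zero (c : List Int) (i : Nat)
    (h : ∀ m, i ≤ m → m < c.length → c.getD m 0 = 0) : (c.drop i).sum = 0 := by
  by_cases hi : i < c.length
  · rw [pvDropCons c i hi, List.sum_cons, h i (le_refl _) hi, zero_add]
    exact pvDropSum_zero c (i+1) (fun m h1 h2 => h m (by omega) h2)
  · rw [List.drop_eq_nil_of_le (by omega)]; rfl
termination_by c.length - i
decreasing_by omega

theorem pvNz_sum (c : List Int) (i : Nat) :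
    ((pvNz c i).map (fun j => c.getD j 0)).sum = (c.drop i).sum := by
  fun_induction pvNz c i with
  | case1 i h hnz ih =>
    rw [pvDropCons c i h, List.sum_cons, List.map_cons, List.sum_cons, ih]
  | case2 i h hz ih =>
    simp only [not_not] at hz
    rw [pvDropCons c i h, List.sum_cons, hz, zero_add, ih]
  | case3 i h => rw [List.drop_eq_nil_of_le (by omega)]; rfl

theorem pvNz_stable (c : List Int) (a b : Nat) (hab : a ≤ b)
    (hz : ∀ m, a ≤ m → m < b → c.getD m 0 = 0) : pvNz c a = pvNz c b := by
  rcases Nat.eq_or_lt_of_le hab with rfl | hlt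
  · rfl
  · rw [pvNz]
    by_cases ha : a < c.length
    · rw [dif_pos ha, if_neg (not_not_intro (hz a (le_refl _) hlt))]
      exact pvNz_stable c (a+1) b hlt (fun m h1 h2 => hz m (by omega) h2)
    · rw [dif_neg ha]
      symm
      rw [pvNz_empty_iff]
      intro m h1 h2; omega
termination_by b - a
decreasing_by omega

theorem pvDropSum_stable (c : List Int) (a b : Nat) (hab : a ≤ b) (hb : b ≤ c.length)
    (hz : ∀ m, a ≤ m → m < b → c.getD m 0 = 0) : (c.drop a).sum = (c.drop b).sum := by
  rcases Nat.eq_or_lt_of_le hab with rfl | hlt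
  · rfl
  · rw [pvDropCons c a (by omega), List.sum_cons, hz a (le_refl _) hlt, zero_add]
    exact pvDropSum_stable c (a+1) b hlt hb (fun m h1 h2 => hz m (by omega) h2)
termination_by b - a
decreasing_by omega

theorem pvZpre_stable (c : List Int) (a b : Nat) (hab : a ≤ b) (hb : b ≤ c.length)
    (hz : ∀ m, a ≤ m → m < b → c.getD m 0 = 0) :
    (List.replicate a (0:Int) ++ c.drop a) = (List.replicate b (0:Int) ++ c.drop b) := by
  rcases Nat.eq_or_lt_of_le hab with rfl | hlt
  · rfl
  · rw [pvDropCons c a (by omega), hz a (le_refl _) hlt, pvRepCons,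
      pvZpre_stable c (a+1) b hlt hb (fun m h1 h2 => hz m (by omega) h2)]
termination_by b - a
decreasing_by omega

theorem pvZpre_stable' (c : List Int) (a b : Nat) (hab : a ≤ b) (hb : b ≤ c.length)
    (hz : ∀ m, a ≤ m → m < b → c.getD m 0 = 0) : pvZpre c a = pvZpre c b :=
  pvZpre_stable c a b hab hb hz

theorem pvZpre_length (c : List Int) (i : Nat) (h : i ≤ c.length) :
    (pvZpre c i).length = c.length := by
  simp [pvZpre]; omega

theorem pvZpre_getD (c : List Int) (i j : Nat) (hi : i ≤ c.length) :
    (pvZpre c i).getD j 0 = if j < i then 0 else c.getD j 0 := by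
  simp only [pvZpre, List.getD_eq_getElem?_getD]
  by_cases hj : j < i
  · rw [if_pos hj, List.getElem?_append_left (by simp; omega)]
    simp [hj]
  · rw [if_neg hj]
    by_cases hjl : j < c.length
    · rw [List.getElem?_append_right (by simp; omega)]
      simp only [List.length_replicate]
      rw [List.getElem?_drop]
      have hji : i + (j - i) = j := by omega
      rw [hji]
    · rw [List.getElem?_eq_none (by simp; omega), List.getElem?_eq_none (by omega)]

theorem pvZpre_sum (c : List Int) (i : Nat) : (pvZpre c i).sum = (c.drop i).sum := by
  simp [pvZpre]

theorem pvZpre_set (c : List Int) (i : Nat) (h : i < c.length) :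
    (pvZpre c i).set i 0 = pvZpre c (i+1) := by
  simp only [pvZpre]
  rw [pvDropCons c i h]
  simp
  rw [pvRepCons]

theorem pvNz_head (c : List Int) (i j : Nat) (rest : List Nat)
    (h : pvNz c i = j :: rest) :
    (∀ m, i ≤ m → m < j → c.getD m 0 = 0) ∧ rest = pvNz c (j+1) := by
  fun_induction pvNz c i with
  | case1 i hlen hnz ih =>
    rw [List.cons_eq_cons] at h
    obtain ⟨rfl, rfl⟩ := h
    exact ⟨fun m h1 h2 => by omega, rfl⟩
  | case2 i hlen hz ih =>
    simp only [not_not] at hz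
    obtain ⟨ih1, ih2⟩ := ih h
    refine ⟨fun m h1 h2 => ?_, ih2⟩
    rcases Nat.eq_or_lt_of_le h1 with rfl | h1
    · exact hz
    · exact ih1 m h1 h2
  | case3 i hlen => simp at h

theorem pvNz_last (c : List Int) (i jl : Nat) :
    (pvNz c i).getLast? = some jl →
    ∀ m, jl < m → m < c.length → c.getD m 0 = 0 := by
  fun_induction pvNz c i with
  | case1 i hlen hnz ih =>
    intro h m hm1 hm2
    by_cases hr : pvNz c (i+1) = []
    · rw [hr] at h
      simp at h
      exact (pvNz_empty_iff c (i+1)).1 hr m (by omega) hm2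
    · obtain ⟨x, xs, hxs⟩ := List.exists_cons_of_ne_nil hr
      rw [hxs, List.getLast?_cons_cons] at h
      exact ih (by rw [hxs]; exact h) m hm1 hm2
  | case2 i hlen hz ih => exact ih
  | case3 i hlen => intro h; simp at h

theorem pvScanR_spec (cl : List Int) (i R : Int) (hR : 1 ≤ R)
    (hz : ∀ m : Int, 1 ≤ m → m < R → PySem.List.pyGet? cl (i + m) = some 0)
    (hnz : ∃ v, PySem.List.pyGet? cl (i + R) = some v ∧ v ≠ 0) :
    ∀ (t : Int) (fuel : Nat), 1 ≤ t → t ≤ R → (R - t).toNat < fuel →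
      pvScanR cl i t fuel = R := by
  intro t fuel
  induction fuel generalizing t with
  | zero => intro _ _ h3; omega
  | succ f ih =>
    intro h1 h2 h3
    rcases eq_or_lt_of_le h2 with rfl | hlt
    · obtain ⟨v, hv, hvne⟩ := hnz
      simp only [pvScanR, hv]
      simp [hvne]
    · simp only [pvScanR, hz t h1 hlt]
      simp only [BEq.rfl, if_true]
      exact ih (t+1) (by omega) (by omega) (by omega)

theorem pvScanL_spec (cl : List Int) (i L : Int) (hL : 1 ≤ L)
    (hz : ∀ m : Int, 1 ≤ m → m < L → PySem.List.pyGet? cl (i - m) = some 0)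
    (hnz : ∃ v, PySem.List.pyGet? cl (i - L) = some v ∧ v ≠ 0) :
    ∀ (t : Int) (fuel : Nat), 1 ≤ t → t ≤ L → (L - t).toNat < fuel →
      pvScanL cl i t fuel = L := by
  intro t fuel
  induction fuel generalizing t with
  | zero => intro _ _ h3; omega
  | succ f ih =>
    intro h1 h2 h3
    rcases eq_or_lt_of_le h2 with rfl | hlt
    · obtain ⟨v, hv, hvne⟩ := hnz
      simp only [pvScanL, hv]
      simp [hvne]
    · simp only [pvScanL, hz t h1 hlt]
      simp only [BEq.rfl, if_true]
      exact ih (t+1) (by omega) (by omega) (by omega)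

theorem pvZpre_get? (c : List Int) (i j : Nat) (hi : i ≤ c.length) (hj : j < c.length) :
    (pvZpre c i)[j]? = some (if j < i then 0 else c.getD j 0) := by
  have hs : j < (pvZpre c i).length := by rw [pvZpre_length c i hi]; exact hj
  have h1 := pvZpre_getD c i j hi
  rw [List.getD_eq_getElem?_getD, List.getElem?_eq_getElem hs] at h1
  rw [List.getElem?_eq_getElem hs]
  simpa using h1

theorem pvGetD_eq (c : List Int) (j : Nat) (hj : j < c.length) : (c)[j]? = some (c.getD j 0) := by
  rw [List.getElem?_eq_getElem hj]
  congr 1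
  rw [List.getD_eq_getElem?_getD, List.getElem?_eq_getElem hj]
  rfl

theorem pvSim (c : List Int) : ∀ (fuel : Nat) (i : Nat) (ans : Int), i < c.length →
    pvALoop (pvZpre c i) i ans fuel
      = pvBLoop c (c.length) (List.map (fun j : Nat => (j : Int)) (pvNz c i)) ((c.drop i).sum) ans i fuel := by
  intro fuel
  induction fuel with
  | zero => intro i ans hi; rfl
  | succ f ih =>
    intro i ans hi
    have hA : PySem.List.pyGet? (pvZpre c i) (i : Int) = some (c.getD i 0) := by
      rw [PySem.List.pyGet?_natCast, pvZpre_get? c i i (by omega) hi]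
      simp
    have hB : PySem.List.pyGet? c (i : Int) = some (c.getD i 0) := by
      rw [PySem.List.pyGet?_natCast, pvGetD_eq c i hi]
    have hset : PySem.List.pySetD (pvZpre c i) (i : Int) 0 = pvZpre c (i+1) := by
      rw [PySem.List.pySetD_natCast, pvZpre_set c i hi]
    simp only [pvALoop, pvBLoop, hA, hB, hset]
    -- state after the pop: nz1 = pvNz c (i+1), rem1 = (c.drop (i+1)).sum
    have hsum1 : (pvZpre c (i+1)).sum = (c.drop (i+1)).sum := pvZpre_sum c (i+1)
    have key : ∀ (G : List Int → Int → Prop),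
        (G (List.map (fun j : Nat => (j : Int)) (pvNz c (i+1))) ((c.drop (i+1)).sum)) →
        (G (match List.map (fun j : Nat => (j : Int)) (pvNz c i) with
            | j :: rest => if j == (i:Int) then rest else j :: rest
            | [] => [])
           (match List.map (fun j : Nat => (j : Int)) (pvNz c i) with
            | j :: _ => if j == (i:Int) then (c.drop i).sum - c.getD i 0 else (c.drop i).sum
            | [] => (c.drop i).sum)) := by
      intro G hG
      cases hp : pvNz c i with
      | nil =>
        have hz := (pvNz_empty_iff c i).1 hp
        have h0 : c.getD i 0 = 0 := hz i (le_refl _) hi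
        have hnz1 : pvNz c (i+1) = [] := (pvNz_empty_iff c (i+1)).2
          (fun m h1 h2 => hz m (by omega) h2)
        have hdrop : (c.drop i).sum = (c.drop (i+1)).sum := by
          rw [pvDropCons c i hi, List.sum_cons, h0, zero_add]
        rw [hnz1, List.map_nil] at hG
        simp only [List.map_nil]
        rw [hdrop]
        exact hG
      | cons j rest =>
        obtain ⟨hzlt, hrest⟩ := pvNz_head c i j rest hp
        have hjmem := pvNz_mem c i j (by rw [hp]; exact List.mem_cons_self)
        by_cases hji : j = i
        · subst hji
          have hdrop : (c.drop j).sum - c.getD j 0 = (c.drop (j+1)).sum := by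
            rw [pvDropCons c j hi, List.sum_cons]; ring
          rw [← hrest] at hG
          simp only [List.map_cons, beq_self_eq_true, if_true]
          rw [hdrop]
          exact hG
        · have h0 : c.getD i 0 = 0 := hzlt i (le_refl _) (by omega)
          have hnz1 : pvNz c (i+1) = j :: rest := by
            have heq : pvNz c i = pvNz c (i+1) := by
              rw [pvNz, dif_pos hi, if_neg (not_not_intro h0)]
            rw [← heq, hp]
          have hbeq : ((j:Int) == (i:Int)) = false := by
            simp [hji]
          have hdrop : (c.drop i).sum = (c.drop (i+1)).sum := by
            rw [pvDropCons c i hi, List.sum_cons, h0, zero_add]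
          rw [hnz1, List.map_cons] at hG
          simp only [List.map_cons, hbeq, Bool.false_eq_true, if_false]
          rw [hdrop]
          exact hG
    refine key (fun nz1 rem1 =>
      (if (pvZpre c (i+1)).sum == 0 then ans + c.getD i 0
       else
        let l := pvScanL (pvZpre c (i+1)) i 1 ((pvZpre c (i+1)).length + 1)
        let r := pvScanR (pvZpre c (i+1)) i 1 ((pvZpre c (i+1)).length + 1)
        let step := if l < r then l else r
        pvALoop (pvZpre c (i+1)) (i + step) (ans + c.getD i 0 + step) f)
      = (if rem1 == 0 then ans + c.getD i 0
       else
        match PySem.List.pyGet? nz1 (-1), PySem.List.pyGet? nz1 0 with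
        | some last, some first =>
          let l := (i:Int) + c.length - last
          let r := first - i
          let step := if l < r then l else r
          pvBLoop c c.length nz1 rem1 (ans + c.getD i 0 + step) (i + step) f
        | _, _ => ans + c.getD i 0)) ?_
    -- now prove the abstract instance
    rw [hsum1]
    by_cases hs : (c.drop (i+1)).sum = 0
    · simp [hs]
    · have hsb : ((c.drop (i+1)).sum == 0) = false := by simp [hs]
      simp only [hsb, Bool.false_eq_true, if_false]
      have hne : pvNz c (i+1) ≠ [] := fun hnil =>
        hs (pvDropSum_zero c (i+1) ((pvNz_empty_iff c (i+1)).1 hnil))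
      obtain ⟨j0, rest', hcons⟩ := List.exists_cons_of_ne_nil hne
      obtain ⟨hbelow, hrest'⟩ := pvNz_head c (i+1) j0 rest' hcons
      have hj0 := pvNz_mem c (i+1) j0 (by rw [hcons]; exact List.mem_cons_self)
      obtain ⟨jl, hq⟩ : ∃ jl, (pvNz c (i+1)).getLast? = some jl :=
        ⟨_, List.getLast?_eq_some_getLast hne⟩
      have hjlp := pvNz_mem c (i+1) jl (List.mem_of_getLast? hq)
      have habove := pvNz_last c (i+1) jl hq
      have hjl1 : i + 1 ≤ jl := hjlp.1
      have hjl2 : jl < c.length := hjlp.2.1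
      have hj01 : i + 1 ≤ j0 := hj0.1
      have hj02 : j0 < c.length := hj0.2.1
      have hlen1 : (pvZpre c (i+1)).length = c.length := pvZpre_length c (i+1) (by omega)
      have hBlast : PySem.List.pyGet? (List.map (fun j : Nat => (j : Int)) (pvNz c (i+1))) (-1)
          = some ((jl : Nat) : Int) := by
        rw [PySem.List.pyGet?_neg_one, List.getLast?_map, hq]
        rfl
      have hBfirst : PySem.List.pyGet? (List.map (fun j : Nat => (j : Int)) (pvNz c (i+1))) 0
          = some ((j0 : Nat) : Int) := by
        rw [hcons, List.map_cons, PySem.List.pyGet?_zero_cons]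
      have hscanR : pvScanR (pvZpre c (i+1)) i 1 (c.length + 1) = (j0 : Int) - i := by
        refine pvScanR_spec (pvZpre c (i+1)) i ((j0 : Int) - i) (by push_cast; omega)
          ?_ ?_ 1 (c.length + 1) (le_refl _) (by push_cast; omega) (by omega)
        · intro m hm1 hm2
          have h0m : (0 : Int) ≤ (i : Int) + m := by omega
          rw [PySem.List.pyGet?_of_nonneg _ h0m,
            pvZpre_get? c (i+1) ((i : Int) + m).toNat (by omega) (by omega)]
          rw [if_neg (by omega)]
          rw [hbelow (((i : Int) + m).toNat) (by omega) (by omega)]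
        · refine ⟨c.getD j0 0, ?_, hj0.2.2⟩
          have hij : (i : Int) + ((j0 : Int) - i) = ((j0 : Nat) : Int) := by ring
          rw [hij, PySem.List.pyGet?_natCast, pvZpre_get? c (i+1) j0 (by omega) hj02]
          rw [if_neg (by omega)]
      have hscanL : pvScanL (pvZpre c (i+1)) i 1 (c.length + 1)
          = (i : Int) + (c.length : Int) - (jl : Nat) := by
        refine pvScanL_spec (pvZpre c (i+1)) i _ (by omega) ?_ ?_ 1 (c.length + 1)
          (le_refl _) (by omega) (by omega)
        · intro m hm1 hm2
          by_cases hp0 : (0 : Int) ≤ (i : Int) - m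
          · rw [PySem.List.pyGet?_of_nonneg _ hp0,
              pvZpre_get? c (i+1) ((i : Int) - m).toNat (by omega) (by omega)]
            rw [if_pos (by omega)]
          · have hk : (i : Int) - m = -(((m - i : Int).toNat : Nat) : Int) := by omega
            rw [hk, PySem.List.pyGet?_neg_natCast _ _ (by omega) (by rw [hlen1]; omega)]
            rw [hlen1]
            have hq : (c.length - (m - (i : Int)).toNat : Nat) < c.length := by omega
            rw [pvZpre_get? c (i+1) _ (by omega) hq]
            rw [if_neg (by omega)]
            rw [habove _ (by omega) hq]
        · refine ⟨c.getD (jl) 0, ?_, hjlp.2.2⟩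
          have hk : (i : Int) - ((i : Int) + (c.length : Int) - (jl : Nat))
              = -(((c.length - jl : Nat) : Nat) : Int) := by
            push_cast; omega
          rw [hk, PySem.List.pyGet?_neg_natCast _ _ (by omega) (by rw [hlen1]; omega)]
          rw [hlen1]
          have hq : (c.length - (c.length - jl : Nat) : Nat)
              = jl := by omega
          rw [hq, pvZpre_get? c (i+1) _ (by omega) hjl2]
          rw [if_neg (by omega)]
      rw [hlen1, hscanL, hscanR, hBlast, hBfirst]
      dsimp only
      have h1L : (1 : Int) ≤ (i : Int) + (c.length : Int) - (jl : Nat) := by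
        omega
      have h1R : (1 : Int) ≤ (j0 : Int) - i := by omega
      set L : Int := (i : Int) + (c.length : Int) - (jl : Nat) with hLdef
      set R : Int := ((j0 : Nat) : Int) - (i : Nat) with hRdef
      set S : Int := if L < R then L else R with hSdef
      have hS1 : 1 ≤ S := by rw [hSdef]; split <;> omega
      have hSR : S ≤ R := by rw [hSdef]; split <;> omega
      have hcast : (i : Int) + S = ((i + S.toNat : Nat) : Int) := by push_cast; omega
      rw [hcast]
      have hz01 : ∀ m, i + 1 ≤ m → m < i + S.toNat → c.getD m 0 = 0 := by
        intro m h1 h2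
        exact hbelow m h1 (by omega)
      have hb1 : i + 1 ≤ i + S.toNat := by omega
      have hb2 : i + S.toNat ≤ c.length := by omega
      rw [pvZpre_stable' c (i+1) (i + S.toNat) hb1 hb2 hz01,
        pvNz_stable c (i+1) (i + S.toNat) hb1 hz01,
        pvDropSum_stable c (i+1) (i + S.toNat) hb1 hb2 hz01]
      exact ih (i + S.toNat) (ans + c.getD i 0 + S) (by omega)

theorem pvNz_eq_range' (c : List Int) (i : Nat) :
    pvNz c i = (List.range' i (c.length - i)).filter (fun j => c.getD j 0 != 0) := by
  fun_induction pvNz c i with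
  | case1 i h hnz ih =>
    have hk : c.length - i = (c.length - (i+1)) + 1 := by omega
    rw [hk, List.range'_succ, List.filter_cons]
    simp only [bne_iff_ne, ne_eq, hnz, not_false_eq_true, decide_true, if_true]
    rw [ih]
  | case2 i h hz ih =>
    simp only [not_not] at hz
    have hk : c.length - i = (c.length - (i+1)) + 1 := by omega
    rw [hk, List.range'_succ, List.filter_cons]
    simp only [hz, bne_self_eq_false, if_false]
    exact ih
  | case3 i h =>
    have hk : c.length - i = 0 := by omega
    rw [hk]
    rfl

theorem pvNz_zero_eq (c : List Int) :
    (PySem.List.pyRange 0 (c.length) 1).filter (fun j => PySem.List.pyGetD c j 0 != 0)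
      = List.map (fun j : Nat => (j : Int)) (pvNz c 0) := by
  rw [PySem.List.pyRange_zero_natCast, List.filter_map]
  congr 1
  rw [pvNz_eq_range' c 0, Nat.sub_zero, ← List.range_eq_range']
  apply List.filter_congr
  intro j _
  simp [Function.comp, PySem.List.pyGetD_natCast]

theorem pvMain (name : String) (h : name.toList ≠ []) : solution name = solution_alt name := by
  have hlen : 0 < (pvChg name).length := by
    simp only [pvChg, List.length_map]
    exact List.length_pos_iff.2 h
  simp only [solution, solution_alt]
  rw [pvNz_zero_eq, List.map_map]
  have hrem : ((pvNz (pvChg name) 0).map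
      ((fun j => PySem.List.pyGetD (pvChg name) j 0) ∘ (fun j : Nat => (j : Int)))).sum
      = (((pvChg name)).drop 0).sum := by
    rw [← pvNz_sum]
    congr 1
    apply List.map_congr_left
    intro j hj
    simp [Function.comp, PySem.List.pyGetD_natCast]
  rw [hrem]
  have hsim := pvSim (pvChg name) ((pvChg name).length + 1) 0 0 hlen
  simpa [pvZpre] using hsim

-- ===== VERDICT (by name: the statement is the Claim_ definition above) =====
theorem solution_spec : Claim_equal_solution := by
  intro name _ hpre
  have h : name.toList ≠ [] := by
    intro hnil
    apply hpre
    rwa [String.toList_eq_nil_iff] at hnil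
  exact pvMain name h
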